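-- pv_equiv track=rewrite | github.com/AWooldrige/s3sup | s3sup/catalogue.py | _order_for_upload
-- ===== SOURCE A (Python) =====
-- def _order_for_upload(path_names):
--     """
--     Prevent HTML files referencing static assets (stylesheets/scripts/images)
--     before they exist on S3. Achieved by applying a crude but effective
--     ordering to the upload sequence to ensure HTML files are uploaded after all
--     other assets.
--     """
--     html, css, js, others = [], [], [], []
--     for p in path_names:
--         pl = p.lower()
--         if pl.endswith(('.html', '.htm', '.xhtml')):
--             html.append(p)
--         elif pl.endswith(('.css')):
--             css.append(p)
--         elif pl.endswith(('.js')):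
--             js.append(p)
--         else:
--             others.append(p)
--
--     def _srt(g):
--         return sorted(sorted(g), key=lambda x: x.count('/'), reverse=True)
--
--     ordered = _srt(others) + _srt(css) + _srt(js) + _srt(html)
--     assert len(ordered) == len(path_names)
--     return ordered
-- ===== SOURCE B (Python) =====
-- def _order_for_upload(path_names):
--     """
--     Prevent HTML files referencing static assets (stylesheets/scripts/images)
--     before they exist on S3: HTML files are uploaded after all other assets.
--     Single composite stable sort instead of four buckets each double-sorted.
--     """
--     def rank(p):
--         pl = p.lower()
--         if pl.endswith(('.html', '.htm', '.xhtml')):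
--             return 3
--         if pl.endswith('.css'):
--             return 1
--         if pl.endswith('.js'):
--             return 2
--         return 0
--     return sorted(sorted(path_names), key=lambda p: (rank(p), -p.count('/')))
-- ===== Notes on version B (the rewrite author's own statement) =====
-- stated objective: simpler
-- what changed: Replaces the four-bucket partition with per-bucket double sorts and the assert by one stable sort of the alphabetically-sorted list under a composite key (category rank, -slash count).
import Mathlib
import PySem

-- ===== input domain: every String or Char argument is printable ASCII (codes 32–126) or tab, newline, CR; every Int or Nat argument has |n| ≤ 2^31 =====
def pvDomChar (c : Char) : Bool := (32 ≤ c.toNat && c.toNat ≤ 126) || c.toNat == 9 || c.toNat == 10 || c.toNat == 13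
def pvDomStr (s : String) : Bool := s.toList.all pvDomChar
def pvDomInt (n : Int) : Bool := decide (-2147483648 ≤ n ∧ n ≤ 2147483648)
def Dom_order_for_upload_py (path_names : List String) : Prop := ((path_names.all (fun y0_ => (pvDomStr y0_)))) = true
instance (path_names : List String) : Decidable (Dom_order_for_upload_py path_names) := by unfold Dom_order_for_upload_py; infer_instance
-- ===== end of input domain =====

-- B replaces A's four-bucket partition plus per-bucket double sorts by one stable sort of the
-- alphabetically pre-sorted list under a composite (category rank, -slash count) key: simpler, same result.

-- ===== PORT A =====
-- one iteration of A's partition loop: append p to the bucket selected by the extension tests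
def pvStepA (st : List String × List String × List String × List String) (p : String) :
    List String × List String × List String × List String :=
  let pl := PySem.Str.lower p
  if PySem.Str.endswith pl ".html" || PySem.Str.endswith pl ".htm" || PySem.Str.endswith pl ".xhtml" then
    (st.1 ++ [p], st.2.1, st.2.2.1, st.2.2.2)
  else if PySem.Str.endswith pl ".css" then
    (st.1, st.2.1 ++ [p], st.2.2.1, st.2.2.2)
  else if PySem.Str.endswith pl ".js" then
    (st.1, st.2.1, st.2.2.1 ++ [p], st.2.2.2)
  else
    (st.1, st.2.1, st.2.2.1, st.2.2.2 ++ [p])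

-- A's _srt: sorted(sorted(g), key=lambda x: x.count('/'), reverse=True)
def pvSrt (g : List String) : List String :=
  PySem.List.sorted (PySem.List.sorted g (fun x => x) false) (fun x => PySem.Str.count x "/") true

def order_for_upload_py (path_names : List String) : List String :=
  let st := path_names.foldl pvStepA ([], [], [], [])
  -- Python's 'assert len(ordered) == len(path_names)' always succeeds (partition and sorts preserve length)
  pvSrt st.2.2.2 ++ pvSrt st.2.1 ++ pvSrt st.2.2.1 ++ pvSrt st.1

-- ===== PORT B =====
-- B's rank: category of the lowered path (others 0 < css 1 < js 2 < html 3)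
def pvRank (p : String) : Int :=
  let pl := PySem.Str.lower p
  if PySem.Str.endswith pl ".html" || PySem.Str.endswith pl ".htm" || PySem.Str.endswith pl ".xhtml" then 3
  else if PySem.Str.endswith pl ".css" then 1
  else if PySem.Str.endswith pl ".js" then 2
  else 0

def order_for_upload_py_alt (path_names : List String) : List String :=
  PySem.List.sorted2 (PySem.List.sorted path_names (fun x => x) false)
    pvRank (fun p => -(PySem.Str.count p "/" : Int)) false

-- ===== PRECONDITION & SPEC =====
def Spec_order_for_upload_py (path_names : List String) (out : List String) : Prop := out = order_for_upload_py_alt path_names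
instance (path_names : List String) (out : List String) : Decidable (Spec_order_for_upload_py path_names out) := by unfold Spec_order_for_upload_py; infer_instance

-- ===== CLAIM (what is proved, stated in full; the proofs are below) =====
def Claim_equal_order_for_upload_py : Prop := ∀ (path_names : List String), Dom_order_for_upload_py path_names → Spec_order_for_upload_py path_names (order_for_upload_py path_names)

-- ===== LEMMAS AND PROOFS =====

-- proof-only keys
def pvNegCnt (p : String) : Int := -(PySem.Str.count p "/" : Int)
def pvK2 (p : String) : Lex (Int × Int) := toLex (pvRank p, pvNegCnt p)
def pvKey (p : String) : Lex (Int × Lex (Int × String)) := toLex (pvRank p, toLex (pvNegCnt p, p))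

-- STABILITY: inserting x after all already-present elements with key ≤ key x preserves the
-- 'strictly smaller key, or equal key and Q' pairwise invariant.
theorem pv_insertBy_pairwise {α κ : Type} [LinearOrder κ] (k : α → κ) (Q : α → α → Prop)
    (x : α) (acc : List α)
    (hs : acc.Pairwise (fun a b => k a < k b ∨ (k a = k b ∧ Q a b)))
    (hQ : ∀ y ∈ acc, Q y x) :
    (PySem.List.insertBy (fun a b => decide (k a < k b)) x acc).Pairwise
      (fun a b => k a < k b ∨ (k a = k b ∧ Q a b)) := by
  induction acc with
  | nil => simp [PySem.List.insertBy]
  | cons y ys ih =>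
    rw [List.pairwise_cons] at hs
    by_cases h : k x < k y
    · have he : PySem.List.insertBy (fun a b => decide (k a < k b)) x (y :: ys) = x :: y :: ys := by
        simp [PySem.List.insertBy, h]
      rw [he, List.pairwise_cons]
      refine ⟨?_, List.pairwise_cons.mpr hs⟩
      intro z hz
      rcases List.mem_cons.mp hz with rfl | hz
      · exact Or.inl h
      · rcases hs.1 z hz with h' | ⟨h', _⟩
        · exact Or.inl (h.trans h')
        · exact Or.inl (h' ▸ h)
    · have he : PySem.List.insertBy (fun a b => decide (k a < k b)) x (y :: ys) =
          y :: PySem.List.insertBy (fun a b => decide (k a < k b)) x ys := by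
        simp [PySem.List.insertBy, h]
      rw [he, List.pairwise_cons]
      refine ⟨?_, ih hs.2 (fun z hz => hQ z (List.mem_cons_of_mem _ hz))⟩
      intro z hz
      rcases (PySem.List.mem_insertBy _ _ _ _).mp hz with rfl | hz
      · rcases lt_or_eq_of_le (not_lt.mp h) with h' | h'
        · exact Or.inl h'
        · exact Or.inr ⟨h', hQ y (List.mem_cons_self ..)⟩
      · exact hs.1 z hz

-- STABILITY of the whole insertion-sort fold over a Q-pairwise input list
theorem pv_foldl_insertBy_pairwise {α κ : Type} [LinearOrder κ] (k : α → κ) (Q : α → α → Prop)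
    (xs : List α) (acc : List α)
    (hs : acc.Pairwise (fun a b => k a < k b ∨ (k a = k b ∧ Q a b)))
    (hacc : ∀ y ∈ acc, ∀ x ∈ xs, Q y x) (hxs : xs.Pairwise Q) :
    (xs.foldl (fun acc x => PySem.List.insertBy (fun a b => decide (k a < k b)) x acc) acc).Pairwise
      (fun a b => k a < k b ∨ (k a = k b ∧ Q a b)) := by
  induction xs generalizing acc with
  | nil => simpa using hs
  | cons x xs ih =>
    rw [List.pairwise_cons] at hxs
    simp only [List.foldl_cons]
    apply ih
    · exact pv_insertBy_pairwise k Q x acc hs (fun y hy => hacc y hy x (List.mem_cons_self ..))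
    · intro y hy x' hx'
      rcases (PySem.List.mem_insertBy _ _ _ _).mp hy with rfl | hy
      · exact hxs.1 x' hx'
      · exact hacc y hy x' (List.mem_cons_of_mem _ hx')
    · exact hxs.2

-- each A bucket after _srt is ordered by (-slash count, alphabetical)
theorem pvSrt_pairwise (g : List String) :
    (pvSrt g).Pairwise (fun a b => pvNegCnt a < pvNegCnt b ∨ (pvNegCnt a = pvNegCnt b ∧ a ≤ b)) := by
  rw [pvSrt, PySem.List.sorted_rev_eq_foldl_insertBy]
  have hpred : (fun a b : String => decide ((PySem.Str.count b "/") < (PySem.Str.count a "/"))) =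
      (fun a b : String => decide (pvNegCnt a < pvNegCnt b)) := by
    funext a b
    refine decide_eq_decide.mpr ?_
    unfold pvNegCnt
    omega
  rw [hpred]
  refine pv_foldl_insertBy_pairwise pvNegCnt (· ≤ ·) _ [] List.Pairwise.nil (by simp) ?_
  simpa using PySem.List.sorted_pairwise g (fun x : String => x)

-- B's sorted2 is ordered by (lexicographic (rank, -slash count), alphabetical)
theorem pvAlt_pairwise (xs : List String) :
    (order_for_upload_py_alt xs).Pairwise (fun a b => pvK2 a < pvK2 b ∨ (pvK2 a = pvK2 b ∧ a ≤ b)) := by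
  have he : order_for_upload_py_alt xs =
      (PySem.List.sorted xs (fun x => x) false).foldl
        (fun acc x => PySem.List.insertBy (fun a b => decide (pvK2 a < pvK2 b)) x acc) [] := by
    have hpred : (fun a b : String =>
        (decide (pvRank a < pvRank b) ||
          (!decide (pvRank b < pvRank a) && decide (-(PySem.Str.count a "/" : Int) < -(PySem.Str.count b "/" : Int))))) =
        (fun a b : String => decide (pvK2 a < pvK2 b)) := by
      funext a b
      have : (pvK2 a < pvK2 b) ↔ (pvRank a < pvRank b ∨ (pvRank a = pvRank b ∧ pvNegCnt a < pvNegCnt b)) := by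
        simp [pvK2, Prod.Lex.toLex_lt_toLex]
      rcases lt_trichotomy (pvRank a) (pvRank b) with h | h | h
      · simp [this, h, pvNegCnt]
      · simp [this, h, pvNegCnt]
      · simp [this, h, not_lt_of_gt h, h.ne', pvNegCnt]
    rw [order_for_upload_py_alt, ← hpred]
    rfl
  rw [he]
  refine pv_foldl_insertBy_pairwise pvK2 (· ≤ ·) _ [] List.Pairwise.nil (by simp) ?_
  simpa using PySem.List.sorted_pairwise xs (fun x : String => x)

-- A's partition loop computes the four rank-filters of the input
theorem pvFold_eq (xs : List String) (h c j o : List String) :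
    xs.foldl pvStepA (h, c, j, o) =
      (h ++ xs.filter (fun p => pvRank p == 3), c ++ xs.filter (fun p => pvRank p == 1),
       j ++ xs.filter (fun p => pvRank p == 2), o ++ xs.filter (fun p => pvRank p == 0)) := by
  induction xs generalizing h c j o with
  | nil => simp
  | cons x xs ih =>
    rw [List.foldl_cons]
    by_cases h1 : (PySem.Str.endswith (PySem.Str.lower x) ".html" ||
        PySem.Str.endswith (PySem.Str.lower x) ".htm" ||
        PySem.Str.endswith (PySem.Str.lower x) ".xhtml") = true
    · have hstep : pvStepA (h, c, j, o) x = (h ++ [x], c, j, o) := by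
        simp only [pvStepA]; rw [if_pos h1]
      have hr : pvRank x = 3 := by
        simp only [pvRank]; rw [if_pos h1]
      rw [hstep, ih]
      simp [hr, List.append_assoc]
    · by_cases h2 : PySem.Str.endswith (PySem.Str.lower x) ".css" = true
      · have hstep : pvStepA (h, c, j, o) x = (h, c ++ [x], j, o) := by
          simp only [pvStepA]; rw [if_neg h1, if_pos h2]
        have hr : pvRank x = 1 := by
          simp only [pvRank]; rw [if_neg h1, if_pos h2]
        rw [hstep, ih]
        simp [hr, List.append_assoc]
      · by_cases h3 : PySem.Str.endswith (PySem.Str.lower x) ".js" = true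
        · have hstep : pvStepA (h, c, j, o) x = (h, c, j ++ [x], o) := by
            simp only [pvStepA]; rw [if_neg h1, if_neg h2, if_pos h3]
          have hr : pvRank x = 2 := by
            simp only [pvRank]; rw [if_neg h1, if_neg h2, if_pos h3]
          rw [hstep, ih]
          simp [hr, List.append_assoc]
        · have hstep : pvStepA (h, c, j, o) x = (h, c, j, o ++ [x]) := by
            simp only [pvStepA]; rw [if_neg h1, if_neg h2, if_neg h3]
          have hr : pvRank x = 0 := by
            simp only [pvRank]; rw [if_neg h1, if_neg h2, if_neg h3]
          rw [hstep, ih]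
          simp [hr, List.append_assoc]

theorem pvRank_cases (x : String) : pvRank x = 0 ∨ pvRank x = 1 ∨ pvRank x = 2 ∨ pvRank x = 3 := by
  by_cases h1 : (PySem.Str.endswith (PySem.Str.lower x) ".html" ||
      PySem.Str.endswith (PySem.Str.lower x) ".htm" ||
      PySem.Str.endswith (PySem.Str.lower x) ".xhtml") = true
  · have hr : pvRank x = 3 := by simp only [pvRank]; rw [if_pos h1]
    simp [hr]
  · by_cases h2 : PySem.Str.endswith (PySem.Str.lower x) ".css" = true
    · have hr : pvRank x = 1 := by simp only [pvRank]; rw [if_neg h1, if_pos h2]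
      simp [hr]
    · by_cases h3 : PySem.Str.endswith (PySem.Str.lower x) ".js" = true
      · have hr : pvRank x = 2 := by simp only [pvRank]; rw [if_neg h1, if_neg h2, if_pos h3]
        simp [hr]
      · have hr : pvRank x = 0 := by simp only [pvRank]; rw [if_neg h1, if_neg h2, if_neg h3]
        simp [hr]

-- the four rank-filters are a permutation of the input
theorem pvFilter_perm (xs : List String) :
    (xs.filter (fun p => pvRank p == 0) ++ xs.filter (fun p => pvRank p == 1) ++
     xs.filter (fun p => pvRank p == 2) ++ xs.filter (fun p => pvRank p == 3)).Perm xs := by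
  induction xs with
  | nil => simp
  | cons x xs ih =>
    simp only [List.filter_cons]
    have ih' : (xs.filter (fun p => pvRank p == 0) ++ (xs.filter (fun p => pvRank p == 1) ++
        (xs.filter (fun p => pvRank p == 2) ++ xs.filter (fun p => pvRank p == 3)))).Perm xs := by
      simpa [List.append_assoc] using ih
    rcases pvRank_cases x with h | h | h | h
    · simp only [h]
      simpa [List.append_assoc] using ih'.cons x
    · simp only [h]
      have : (xs.filter (fun p => pvRank p == 0) ++ (x :: xs.filter (fun p => pvRank p == 1)) ++
          xs.filter (fun p => pvRank p == 2) ++ xs.filter (fun p => pvRank p == 3)) =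
          xs.filter (fun p => pvRank p == 0) ++ x :: (xs.filter (fun p => pvRank p == 1) ++
          (xs.filter (fun p => pvRank p == 2) ++ xs.filter (fun p => pvRank p == 3))) := by
        simp [List.append_assoc]
      simp only [show ((1:Int) == 0) = false from by decide, show ((1:Int) == 1) = true from by decide,
        show ((1:Int) == 2) = false from by decide, show ((1:Int) == 3) = false from by decide,
        if_true, if_false, Bool.false_eq_true]
      exact this ▸ (List.perm_middle.trans (ih'.cons x))
    · simp only [h]
      have : (xs.filter (fun p => pvRank p == 0) ++ xs.filter (fun p => pvRank p == 1) ++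
          (x :: xs.filter (fun p => pvRank p == 2)) ++ xs.filter (fun p => pvRank p == 3)) =
          (xs.filter (fun p => pvRank p == 0) ++ xs.filter (fun p => pvRank p == 1)) ++ x ::
          (xs.filter (fun p => pvRank p == 2) ++ xs.filter (fun p => pvRank p == 3)) := by
        simp [List.append_assoc]
      simp only [show ((2:Int) == 0) = false from by decide, show ((2:Int) == 1) = false from by decide,
        show ((2:Int) == 2) = true from by decide, show ((2:Int) == 3) = false from by decide,
        if_true, if_false, Bool.false_eq_true]
      refine this ▸ (List.perm_middle.trans ?_)
      have hperm : ((xs.filter (fun p => pvRank p == 0) ++ xs.filter (fun p => pvRank p == 1)) ++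
          (xs.filter (fun p => pvRank p == 2) ++ xs.filter (fun p => pvRank p == 3))).Perm xs := by
        simpa [List.append_assoc] using ih
      exact hperm.cons x
    · simp only [h]
      have : (xs.filter (fun p => pvRank p == 0) ++ xs.filter (fun p => pvRank p == 1) ++
          xs.filter (fun p => pvRank p == 2) ++ (x :: xs.filter (fun p => pvRank p == 3))) =
          (xs.filter (fun p => pvRank p == 0) ++ xs.filter (fun p => pvRank p == 1) ++
          xs.filter (fun p => pvRank p == 2)) ++ x :: xs.filter (fun p => pvRank p == 3) := rfl
      simp only [show ((3:Int) == 0) = false from by decide, show ((3:Int) == 1) = false from by decide,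
        show ((3:Int) == 2) = false from by decide, show ((3:Int) == 3) = true from by decide,
        if_true, if_false, Bool.false_eq_true]
      refine this ▸ (List.perm_middle.trans ?_)
      exact ih.cons x

theorem pvSrt_perm (g : List String) : (pvSrt g).Perm g :=
  (PySem.List.sorted_perm _ _ _).trans (PySem.List.sorted_perm _ _ _)

set_option maxHeartbeats 2000000 in
theorem pvKey_inj : Function.Injective pvKey := by
  intro a b h
  rw [pvKey, pvKey] at h
  simpa using congrArg (fun x => (ofLex (ofLex x).2).2) h

-- A as the concatenation of the sorted rank-filters
theorem pvA_eq (xs : List String) : order_for_upload_py xs =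
    pvSrt (xs.filter (fun p => pvRank p == 0)) ++ pvSrt (xs.filter (fun p => pvRank p == 1)) ++
    pvSrt (xs.filter (fun p => pvRank p == 2)) ++ pvSrt (xs.filter (fun p => pvRank p == 3)) := by
  simp only [order_for_upload_py, pvFold_eq xs [] [] [] [], List.nil_append]

set_option maxHeartbeats 2000000 in
theorem pvKey_le_of (a b : String) (hr : pvRank a = pvRank b)
    (hd : pvNegCnt a < pvNegCnt b ∨ (pvNegCnt a = pvNegCnt b ∧ a ≤ b)) : pvKey a ≤ pvKey b := by
  rw [pvKey, pvKey, Prod.Lex.toLex_le_toLex]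
  rcases hd with h | ⟨h1, h2⟩
  · exact Or.inr ⟨hr, le_of_lt (Prod.Lex.toLex_lt_toLex.mpr (Or.inl h))⟩
  · exact Or.inr ⟨hr, Prod.Lex.toLex_le_toLex.mpr (Or.inr ⟨h1, h2⟩)⟩

set_option maxHeartbeats 2000000 in
theorem pvKey_le_of_rank_lt (a b : String) (h : pvRank a < pvRank b) : pvKey a ≤ pvKey b := by
  rw [pvKey, pvKey]
  exact le_of_lt (Prod.Lex.toLex_lt_toLex.mpr (Or.inl h))

theorem pvRank_of_mem_srt_filter {xs : List String} {i : Int} {a : String}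
    (ha : a ∈ pvSrt (xs.filter (fun p => pvRank p == i))) : pvRank a = i := by
  rw [pvSrt, PySem.List.mem_sorted, PySem.List.mem_sorted] at ha
  simpa using (List.mem_filter.mp ha).2

theorem pv_bucket_pairwise (xs : List String) (i : Int) :
    (pvSrt (xs.filter (fun p => pvRank p == i))).Pairwise (fun a b => pvKey a ≤ pvKey b) := by
  refine (pvSrt_pairwise _).imp_of_mem ?_
  intro a b ha hb hd
  exact pvKey_le_of a b ((pvRank_of_mem_srt_filter ha).trans (pvRank_of_mem_srt_filter hb).symm) hd

theorem pvA_pairwise (xs : List String) :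
    (order_for_upload_py xs).Pairwise (fun a b => pvKey a ≤ pvKey b) := by
  rw [pvA_eq]
  have hcross : ∀ (i j : Int), i < j → ∀ a ∈ pvSrt (xs.filter (fun p => pvRank p == i)),
      ∀ b ∈ pvSrt (xs.filter (fun p => pvRank p == j)), pvKey a ≤ pvKey b := by
    intro i j hij a ha b hb
    refine pvKey_le_of_rank_lt a b ?_
    rw [pvRank_of_mem_srt_filter ha, pvRank_of_mem_srt_filter hb]; exact hij
  rw [List.pairwise_append]
  refine ⟨?_, pv_bucket_pairwise xs 3, ?_⟩
  · rw [List.pairwise_append]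
    refine ⟨?_, pv_bucket_pairwise xs 2, ?_⟩
    · rw [List.pairwise_append]
      exact ⟨pv_bucket_pairwise xs 0, pv_bucket_pairwise xs 1,
        fun a ha b hb => hcross 0 1 (by norm_num) a ha b hb⟩
    · intro a ha b hb
      rcases List.mem_append.mp ha with ha | ha
      · exact hcross 0 2 (by norm_num) a ha b hb
      · exact hcross 1 2 (by norm_num) a ha b hb
  · intro a ha b hb
    rcases List.mem_append.mp ha with ha | ha
    · rcases List.mem_append.mp ha with ha | ha
      · exact hcross 0 3 (by norm_num) a ha b hb
      · exact hcross 1 3 (by norm_num) a ha b hb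
    · exact hcross 2 3 (by norm_num) a ha b hb

set_option maxHeartbeats 2000000 in
theorem pvB_pairwise (xs : List String) :
    (order_for_upload_py_alt xs).Pairwise (fun a b => pvKey a ≤ pvKey b) := by
  refine (pvAlt_pairwise xs).imp ?_
  intro a b h
  rw [pvK2, pvK2] at h
  rcases h with h | ⟨h1, h2⟩
  · rcases Prod.Lex.toLex_lt_toLex.mp h with h | ⟨h, h'⟩
    · exact pvKey_le_of_rank_lt a b h
    · exact pvKey_le_of a b h (Or.inl h')
  · have h1' : (pvRank a, pvNegCnt a) = (pvRank b, pvNegCnt b) := congrArg ofLex h1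
    have hr : pvRank a = pvRank b := congrArg Prod.fst h1'
    have hn : pvNegCnt a = pvNegCnt b := congrArg Prod.snd h1'
    exact pvKey_le_of a b hr (Or.inr ⟨hn, h2⟩)

theorem pvA_perm (xs : List String) : (order_for_upload_py xs).Perm xs := by
  rw [pvA_eq]
  exact ((((pvSrt_perm _).append (pvSrt_perm _)).append (pvSrt_perm _)).append
    (pvSrt_perm _)).trans (pvFilter_perm xs)

theorem pvB_perm (xs : List String) : (order_for_upload_py_alt xs).Perm xs :=
  (PySem.List.sorted2_perm _ _ _ _).trans (PySem.List.sorted_perm _ _ _)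

-- ===== VERDICT (by name: the statement is the Claim_ definition above) =====
theorem order_for_upload_py_spec : Claim_equal_order_for_upload_py := by
  intro xs _
  show order_for_upload_py xs = order_for_upload_py_alt xs
  exact PySem.List.eq_of_perm_of_pairwise_le_of_injective pvKey pvKey_inj
    ((pvA_perm xs).trans (pvB_perm xs).symm) (pvA_pairwise xs) (pvB_pairwise xs)
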